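-- pv_equiv track=rewrite | github.com/Chr1sChanman/python-practice | tip102/u2s2-DistinctElements.py | organize_exhibition
-- ===== SOURCE A (Python) =====
-- from collections import Counter
--
-- def organize_exhibition(collection):
--     c = Counter(collection)
--     res = []
--
--     while any(c.values()):
--         temp = []
--         for key in list(c.keys()):
--             if c[key] > 0:
--                 temp.append(key)
--                 c[key] -= 1
--         res.append(temp)
--     return res
-- ===== SOURCE B (Python) =====
-- from collections import Counter
--
-- def organize_exhibition(collection):
--     counts = Counter(collection)
--     rounds = []
--     for key, cnt in counts.items():
--         rounds.extend([] for _ in range(cnt - len(rounds)))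
--         for i in range(cnt):
--             rounds[i].append(key)
--     return rounds
-- ===== Notes on version B (the rewrite author's own statement) =====
-- stated objective: alternative
-- what changed: A repeatedly sweeps the whole counter (one sweep per round, decrementing counts) until all counts hit zero; B builds the counter once and, in a single pass over it, appends each key directly to rounds 0..count-1.
import Mathlib
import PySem

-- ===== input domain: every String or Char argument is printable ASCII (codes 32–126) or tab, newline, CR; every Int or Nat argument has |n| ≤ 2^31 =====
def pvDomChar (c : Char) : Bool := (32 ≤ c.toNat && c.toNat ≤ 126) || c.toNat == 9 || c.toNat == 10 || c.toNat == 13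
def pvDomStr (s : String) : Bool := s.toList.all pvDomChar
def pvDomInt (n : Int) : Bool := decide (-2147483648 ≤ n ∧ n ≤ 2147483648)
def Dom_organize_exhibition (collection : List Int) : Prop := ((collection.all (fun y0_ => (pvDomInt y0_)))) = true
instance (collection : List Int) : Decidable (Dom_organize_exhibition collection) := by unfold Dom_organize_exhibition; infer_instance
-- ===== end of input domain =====

-- B replaces A's repeated sweeps over the whole counter by a single pass over it,
-- appending each key to rounds 0..count-1 (objective: alternative algorithm).


-- ===== PORT A =====
-- one pass of the inner `for key in list(c.keys())` loop: state = (temp, c)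
def pvRoundStep (st : List Int × PySem.Dict Int Int) (key : Int) : List Int × PySem.Dict Int Int :=
  if 0 < st.2.getD key 0 then (st.1 ++ [key], st.2.modify key 0 (· - 1)) else st

-- the `while any(c.values())` loop; fuel `collection.length + 1` always suffices:
-- every count ≤ collection.length and each pass lowers the maximal count by one
def pvLoopA : Nat → PySem.Dict Int Int → List (List Int) → List (List Int)
  | 0, _, res => res
  | fuel+1, c, res =>
    if c.values.any (fun v => v != 0) then
      let st := c.keys.foldl pvRoundStep ([], c)
      pvLoopA fuel st.2 (res ++ [st.1])
    else res

def organize_exhibition (collection : List Int) : List (List Int) :=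
  pvLoopA (collection.length + 1) (PySem.Dict.counter collection) []

-- ===== PORT B =====
-- `rounds.extend([] for _ in range(cnt - len(rounds)))`, then
-- `for i in range(cnt): rounds[i].append(key)`
def pvStepB (rounds : List (List Int)) (kc : Int × Int) : List (List Int) :=
  let rounds := rounds ++ List.replicate (kc.2 - (rounds.length : Int)).toNat ([] : List Int)
  (PySem.List.pyRange 0 kc.2 1).foldl
    (fun rs i => rs.set i.toNat ((rs.getD i.toNat []) ++ [kc.1])) rounds

def organize_exhibition_alt (collection : List Int) : List (List Int) :=
  (PySem.Dict.counter collection).items.foldl pvStepB []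

-- ===== PRECONDITION & SPEC =====
def Spec_organize_exhibition (collection : List Int) (out : List (List Int)) : Prop := out = organize_exhibition_alt collection
instance (collection : List Int) (out : List (List Int)) : Decidable (Spec_organize_exhibition collection out) := by unfold Spec_organize_exhibition; infer_instance

-- ===== CLAIM (what is proved, stated in full; the proofs are below) =====
def Claim_equal_organize_exhibition : Prop := ∀ (collection : List Int), Dom_organize_exhibition collection → Spec_organize_exhibition collection (organize_exhibition collection)

-- ===== LEMMAS AND PROOFS =====
-- Common characterisation pvSpec: round r holds, in first-occurrence order,
-- the keys whose count exceeds r; both ports are proved equal to it.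

def pvMaxc (items : List (Int × Int)) : Nat := items.foldl (fun m p => max m p.2.toNat) 0

theorem pvCount_le_maxc (l : List (Int × Int)) (p : Int × Int) (hp : p ∈ l) :
    p.2.toNat ≤ pvMaxc l :=
  (PySem.List.le_foldl_max_nat l (fun p => p.2.toNat) 0).2 p hp

theorem pvFilter_nil_of_maxc_le (l : List (Int × Int)) (r : Nat) (h : pvMaxc l ≤ r) :
    l.filter (fun p => decide ((r : Int) < p.2)) = [] := by
  rw [List.filter_eq_nil_iff]
  intro p hp
  have := pvCount_le_maxc l p hp
  simp only [decide_eq_true_eq]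
  omega

theorem pvInner (key : Int) (c : Nat) (rs : List (List Int)) (hc : c ≤ rs.length) :
    ((PySem.List.pyRange 0 (c : Int) 1).foldl
        (fun rs i => rs.set i.toNat ((rs.getD i.toNat []) ++ [key])) rs).length = rs.length ∧
    ∀ r : Nat,
      ((PySem.List.pyRange 0 (c : Int) 1).foldl
        (fun rs i => rs.set i.toNat ((rs.getD i.toNat []) ++ [key])) rs)[r]? =
      if r < c then (rs[r]?).map (· ++ [key]) else rs[r]? := by
  induction c with
  | zero =>
    rw [show ((0:Nat):Int) = 0 by rfl, PySem.List.pyRange_one_eq_nil le_rfl]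
    simp
  | succ c ih =>
    have hc' : c ≤ rs.length := Nat.le_of_succ_le hc
    obtain ⟨hlen, hget⟩ := ih hc'
    have hsplit : PySem.List.pyRange 0 ((c+1 : Nat) : Int) 1
        = PySem.List.pyRange 0 (c : Int) 1 ++ [(c : Int)] := by
      push_cast
      exact PySem.List.pyRange_one_succ_right (by positivity)
    rw [hsplit, List.foldl_append, List.foldl_cons, List.foldl_nil]
    set rs' := (PySem.List.pyRange 0 (c : Int) 1).foldl
        (fun rs i => rs.set i.toNat ((rs.getD i.toNat []) ++ [key])) rs with hrs'
    have htoNat : ((c : Int)).toNat = c := by simp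
    rw [htoNat]
    have hval : rs'.getD c [] = rs.getD c [] := by
      rw [List.getD_eq_getElem?_getD, List.getD_eq_getElem?_getD, hget c, if_neg (lt_irrefl c)]
    constructor
    · rw [List.length_set, hlen]
    · intro r
      rw [List.getElem?_set, hlen]
      by_cases hrc : c = r
      · subst hrc
        rw [if_pos rfl, if_pos (show c < rs.length by omega), if_pos (show c < c + 1 by omega),
            List.getElem?_eq_getElem (show c < rs.length by omega), hval,
            List.getD_eq_getElem?_getD, List.getElem?_eq_getElem (show c < rs.length by omega)]
        rfl
      · rw [if_neg hrc, hget r]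
        by_cases h1 : r < c
        · rw [if_pos h1, if_pos (by omega)]
        · rw [if_neg h1, if_neg (by omega)]

def pvSpec (items : List (Int × Int)) : List (List Int) :=
  (List.range (pvMaxc items)).map
    (fun (r : Nat) => (items.filter (fun p => decide ((r : Int) < p.2))).map Prod.fst)

theorem pvMaxc_append (l : List (Int × Int)) (p : Int × Int) :
    pvMaxc (l ++ [p]) = max (pvMaxc l) p.2.toNat := by
  simp [pvMaxc, List.foldl_append]

theorem pvSpec_length (l : List (Int × Int)) : (pvSpec l).length = pvMaxc l := by
  simp [pvSpec]

theorem pvSpec_getElem? (l : List (Int × Int)) (r : Nat) :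
    (pvSpec l)[r]? = if r < pvMaxc l
      then some ((l.filter (fun p => decide ((r : Int) < p.2))).map Prod.fst) else none := by
  unfold pvSpec
  rw [List.getElem?_map]
  by_cases h : r < pvMaxc l
  · rw [List.getElem?_range h]
    simp [h]
  · rw [List.getElem?_eq_none (by simpa using h)]
    simp [h]

theorem pvRound_append (l : List (Int × Int)) (k c : Int) (r : Nat) :
    (((l ++ [(k, c)]).filter (fun p => decide ((r : Int) < p.2))).map Prod.fst)
      = (l.filter (fun p => decide ((r : Int) < p.2))).map Prod.fst
        ++ (if (r : Int) < c then [k] else []) := by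
  rw [List.filter_append, List.map_append]
  congr 1
  by_cases h : (r : Int) < c <;> simp [h]

theorem pvStepB_spec (l : List (Int × Int)) (p : Int × Int) :
    pvStepB (pvSpec l) p = pvSpec (l ++ [p]) := by
  obtain ⟨k, c⟩ := p
  unfold pvStepB
  simp only
  have hm0 : (pvSpec l).length = pvMaxc l := pvSpec_length l
  by_cases hc0 : c ≤ 0
  · -- c ≤ 0 : no padding, no appends
    rw [PySem.List.pyRange_one_eq_nil hc0, List.foldl_nil,
        show (c - ((pvSpec l).length : Int)).toNat = 0 by omega,
        List.replicate_zero, List.append_nil]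
    apply List.ext_getElem?
    intro r
    rw [pvSpec_getElem?, pvSpec_getElem?, pvMaxc_append,
        show max (pvMaxc l) c.toNat = pvMaxc l by omega]
    by_cases h : r < pvMaxc l
    · rw [if_pos h, if_pos h, pvRound_append, if_neg (by omega), List.append_nil]
    · rw [if_neg h, if_neg h]
  · -- 0 < c
    have hcpos : 0 < c := by omega
    set padded := pvSpec l ++ List.replicate (c - ((pvSpec l).length : Int)).toNat ([] : List Int)
      with hpadded
    have hplen : padded.length = max (pvMaxc l) c.toNat := by
      rw [hpadded, List.length_append, List.length_replicate, hm0]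
      omega
    have hcast : ((c.toNat : Nat) : Int) = c := Int.toNat_of_nonneg (by omega)
    obtain ⟨hlen, hget⟩ := pvInner k c.toNat padded (by omega)
    rw [← hcast]
    apply List.ext_getElem?
    intro r
    rw [hget r]
    have hpget : padded[r]? = if r < pvMaxc l
        then some ((l.filter (fun p => decide ((r : Int) < p.2))).map Prod.fst)
        else if r < max (pvMaxc l) c.toNat then some [] else none := by
      by_cases h1 : r < pvMaxc l
      · rw [hpadded, List.getElem?_append_left (by omega), pvSpec_getElem?, if_pos h1, if_pos h1]
      · rw [hpadded, List.getElem?_append_right (by omega), List.getElem?_replicate, hm0]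
        rw [if_neg h1]
        by_cases h2 : r < max (pvMaxc l) c.toNat
        · rw [if_pos (by omega), if_pos h2]
        · rw [if_neg (by omega), if_neg h2]
    rw [hpget, pvSpec_getElem?, pvMaxc_append]
    by_cases h1 : r < c.toNat
    · rw [if_pos h1]
      by_cases h2 : r < pvMaxc l
      · rw [if_pos h2, if_pos (by omega), pvRound_append, if_pos (by omega)]
        rfl
      · rw [if_neg h2, if_pos (by omega), if_pos (by omega), pvRound_append, if_pos (by omega),
            pvFilter_nil_of_maxc_le l r (by omega)]
        rfl
    · rw [if_neg h1]
      by_cases h2 : r < pvMaxc l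
      · rw [if_pos h2, if_pos (by omega), pvRound_append, if_neg (by omega), List.append_nil]
      · rw [if_neg h2, if_neg (by omega), if_neg (by omega)]

theorem pvRoundA_go (ks : List Int) : ∀ (c : PySem.Dict Int Int) (acc : List Int), ks.Nodup →
    (ks.foldl pvRoundStep (acc, c)).1 = acc ++ ks.filter (fun k => decide (0 < c.getD k 0)) ∧
    (ks.foldl pvRoundStep (acc, c)).2.keys = c.keys ∧
    ∀ k : Int, (ks.foldl pvRoundStep (acc, c)).2.getD k 0 =
      if k ∈ ks ∧ 0 < c.getD k 0 then c.getD k 0 - 1 else c.getD k 0 := by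
  induction ks with
  | nil => intro c acc _; simp
  | cons k rest ih =>
    intro c acc hnd
    obtain ⟨hk, hrest⟩ := List.nodup_cons.mp hnd
    rw [List.foldl_cons]
    by_cases hpos : 0 < c.getD k 0
    · have hstep : pvRoundStep (acc, c) k = (acc ++ [k], c.modify k 0 (· - 1)) := by
        simp [pvRoundStep, hpos]
      rw [hstep]
      set c1 := c.modify k 0 (· - 1) with hc1
      have hcont : c.contains k = true := by
        cases h : c.contains k
        · rw [PySem.Dict.getD_of_not_contains c 0 h] at hpos; omega
        · rfl
      have hkeys1 : c1.keys = c.keys := by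
        rw [hc1, PySem.Dict.keys_modify, PySem.Dict.keys_insert_of_contains _ _ hcont]
      have hgetD1 : ∀ k' : Int, c1.getD k' 0 = if k' = k then c.getD k 0 - 1 else c.getD k' 0 := by
        intro k'; rw [hc1, PySem.Dict.getD_modify]
      obtain ⟨ih1, ih2, ih3⟩ := ih c1 (acc ++ [k]) hrest
      refine ⟨?_, by rw [ih2, hkeys1], ?_⟩
      · have hfc : List.filter (fun k' => decide (0 < c1.getD k' 0)) rest
            = List.filter (fun k' => decide (0 < c.getD k' 0)) rest :=
          List.filter_congr (fun k' hk' => by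
            rw [hgetD1 k', if_neg (by rintro rfl; exact hk hk')])
        rw [ih1, hfc, List.filter_cons, if_pos (by simpa using hpos), List.append_assoc,
            List.singleton_append]
      · intro k'
        rw [ih3 k']
        by_cases hkk : k' = k
        · subst hkk
          rw [if_neg (by rintro ⟨h1, _⟩; exact hk h1), hgetD1 k', if_pos rfl,
              if_pos ⟨List.mem_cons_self, hpos⟩]
        · rw [hgetD1 k', if_neg hkk]
          by_cases hm : k' ∈ rest ∧ 0 < c.getD k' 0
          · rw [if_pos hm, if_pos ⟨List.mem_cons_of_mem _ hm.1, hm.2⟩]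
          · rw [if_neg hm, if_neg (by rintro ⟨h1, h2⟩; exact hm ⟨(List.mem_cons.mp h1).resolve_left hkk, h2⟩)]
    · have hstep : pvRoundStep (acc, c) k = (acc, c) := by
        simp [pvRoundStep, hpos]
      rw [hstep]
      obtain ⟨ih1, ih2, ih3⟩ := ih c acc hrest
      refine ⟨?_, ih2, ?_⟩
      · rw [ih1, List.filter_cons, if_neg (by simpa using hpos)]
      · intro k'
        rw [ih3 k']
        by_cases hm : k' ∈ rest ∧ 0 < c.getD k' 0
        · rw [if_pos hm, if_pos ⟨List.mem_cons_of_mem _ hm.1, hm.2⟩]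
        · rw [if_neg hm]
          by_cases hm2 : k' ∈ k :: rest ∧ 0 < c.getD k' 0
          · obtain ⟨h1, h2⟩ := hm2
            rcases List.mem_cons.mp h1 with rfl | h1'
            · rw [if_pos ⟨List.mem_cons_self, h2⟩]; omega
            · exact absurd ⟨h1', h2⟩ hm
          · rw [if_neg hm2]

def pvDec (p : Int × Int) : Int × Int := (p.1, if 0 < p.2 then p.2 - 1 else p.2)

theorem pvFoldlMax_le (l : List (Int × Int)) : ∀ (m n : Nat), m ≤ n → (∀ p ∈ l, p.2.toNat ≤ n) →
    l.foldl (fun m p => max m p.2.toNat) m ≤ n := by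
  induction l with
  | nil => intro m n h _; simpa using h
  | cons p t ih =>
    intro m n h hl
    rw [List.foldl_cons]
    exact ih _ n (by have := hl p List.mem_cons_self; omega)
      (fun q hq => hl q (List.mem_cons_of_mem _ hq))

theorem pvMaxc_le (l : List (Int × Int)) (n : Nat) (h : ∀ p ∈ l, p.2.toNat ≤ n) :
    pvMaxc l ≤ n := pvFoldlMax_le l 0 n (Nat.zero_le n) h

theorem pvMaxc_dec_aux (l : List (Int × Int)) : ∀ (m : Nat), (∀ p ∈ l, 0 ≤ p.2) →
    (l.map pvDec).foldl (fun m p => max m p.2.toNat) (m - 1)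
      = l.foldl (fun m p => max m p.2.toNat) m - 1 := by
  induction l with
  | nil => intro m _; simp
  | cons p t ih =>
    intro m hl
    rw [List.map_cons, List.foldl_cons, List.foldl_cons]
    have h0 : 0 ≤ p.2 := hl p List.mem_cons_self
    have hdec : (pvDec p).2.toNat = p.2.toNat - 1 := by
      simp only [pvDec]; split_ifs <;> omega
    rw [hdec, show max (m - 1) (p.2.toNat - 1) = max m p.2.toNat - 1 by omega]
    exact ih _ (fun q hq => hl q (List.mem_cons_of_mem _ hq))

theorem pvMaxc_dec (l : List (Int × Int)) (h : ∀ p ∈ l, 0 ≤ p.2) :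
    pvMaxc (l.map pvDec) = pvMaxc l - 1 := pvMaxc_dec_aux l 0 h

theorem pvSpec_dec (l : List (Int × Int)) (h0 : ∀ p ∈ l, 0 ≤ p.2) (hne : pvMaxc l ≠ 0) :
    pvSpec l = ((l.filter (fun p => decide (0 < p.2))).map Prod.fst) :: pvSpec (l.map pvDec) := by
  obtain ⟨m', hm'⟩ : ∃ m', pvMaxc l = m' + 1 := ⟨pvMaxc l - 1, by omega⟩
  unfold pvSpec
  rw [pvMaxc_dec l h0, hm', Nat.add_sub_cancel, List.range_succ_eq_map, List.map_cons,
      List.map_map]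
  refine congrArg₂ List.cons ?_ ?_
  · norm_num
  · apply List.map_congr_left
    intro r _
    simp only [Function.comp]
    rw [List.filter_map, List.map_map]
    rw [show Prod.fst ∘ pvDec = Prod.fst from funext (fun p => rfl)]
    congr 1
    apply List.filter_congr
    intro p hp
    have := h0 p hp
    simp only [Function.comp, pvDec]
    split_ifs with h1 <;>
      · simp only [decide_eq_decide]
        push_cast [Nat.succ_eq_add_one]
        omega

theorem pvSpec_of_maxc_zero (l : List (Int × Int)) (h : pvMaxc l = 0) : pvSpec l = [] := by
  unfold pvSpec
  rw [h]
  simp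

theorem pvLoopA_spec : ∀ (fuel : Nat) (c : PySem.Dict Int Int) (res : List (List Int)),
    c.keys.Nodup → (∀ p ∈ c.items, 0 ≤ p.2) → pvMaxc c.items ≤ fuel →
    pvLoopA fuel c res = res ++ pvSpec c.items := by
  intro fuel
  induction fuel with
  | zero =>
    intro c res _ _ hfuel
    rw [pvLoopA, pvSpec_of_maxc_zero _ (by omega), List.append_nil]
  | succ fuel ih =>
    intro c res hnd hpos hfuel
    rw [pvLoopA]
    by_cases hcond : c.values.any (fun v => v != 0)
    · rw [if_pos hcond]
      obtain ⟨g1, g2, g3⟩ := pvRoundA_go c.keys c [] hnd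
      set st := c.keys.foldl pvRoundStep ([], c) with hst
      have hitems : c.items = c.keys.map (fun k => (k, c.getD k 0)) :=
        PySem.Dict.items_eq_map_keys c hnd 0
      -- st.2.items are the decremented items
      have hitems2 : st.2.items = c.items.map pvDec := by
        rw [PySem.Dict.items_eq_map_keys st.2 (by rw [g2]; exact hnd) 0, g2, hitems,
            List.map_map]
        apply List.map_congr_left
        intro k hk
        simp only [Function.comp, pvDec, g3 k]
        by_cases h : 0 < c.getD k 0
        · rw [if_pos ⟨hk, h⟩, if_pos h]
        · rw [if_neg (by tauto), if_neg h]
      -- the emitted round is round 0 of the spec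
      have htemp : st.1 = (c.items.filter (fun p => decide (0 < p.2))).map Prod.fst := by
        have e1 : ((fun p : Int × Int => decide (0 < p.2)) ∘ fun k : Int => (k, c.getD k 0))
            = fun k : Int => decide (0 < c.getD k 0) := funext (fun k => rfl)
        have e2 : (Prod.fst ∘ fun k : Int => (k, c.getD k 0)) = fun k : Int => k :=
          funext (fun k => rfl)
        rw [g1, hitems, List.filter_map, List.map_map, List.nil_append, e1, e2, List.map_id']
      -- some count is nonzero, hence positive, hence pvMaxc ≥ 1
      have hmax1 : pvMaxc c.items ≠ 0 := by
        rw [List.any_eq_true] at hcond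
        obtain ⟨v, hv, hv0⟩ := hcond
        simp only [PySem.Dict.values] at hv
        obtain ⟨p, hp, rfl⟩ := List.mem_map.mp hv
        have h1 := hpos p hp
        have h2 := pvCount_le_maxc c.items p hp
        have : p.2 ≠ 0 := by simpa using hv0
        omega
      rw [ih st.2 (res ++ [st.1]) (by rw [g2]; exact hnd)
            (by intro p hp; rw [hitems2] at hp
                obtain ⟨q, hq, rfl⟩ := List.mem_map.mp hp
                have := hpos q hq
                simp only [pvDec]
                split_ifs <;> omega)
            (by rw [hitems2, pvMaxc_dec _ hpos]; omega)]
      rw [hitems2, pvSpec_dec c.items hpos hmax1, ← htemp, List.append_assoc,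
          List.singleton_append]
    · rw [if_neg hcond]
      have hall : ∀ p ∈ c.items, p.2 = 0 := by
        intro p hp
        rw [List.any_eq_true] at hcond
        push Not at hcond
        have := hcond p.2 (by simp only [PySem.Dict.values]; exact List.mem_map_of_mem hp)
        simpa using this
      rw [pvSpec_of_maxc_zero _ (by
            have := pvMaxc_le c.items 0 (fun p hp => by rw [hall p hp]; rfl)
            omega),
          List.append_nil]

theorem pvFoldB_spec (l : List (Int × Int)) : l.foldl pvStepB [] = pvSpec l := by
  induction l using List.reverseRecOn with
  | nil => simp [pvSpec, pvMaxc]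
  | append_singleton l p ih => rw [List.foldl_append, List.foldl_cons, List.foldl_nil, ih, pvStepB_spec]

theorem organize_exhibition_eq_pvSpec (collection : List Int) :
    organize_exhibition collection = pvSpec (PySem.Dict.counter collection).items := by
  unfold organize_exhibition
  have hpos : ∀ p ∈ (PySem.Dict.counter collection).items, 0 ≤ p.2 := by
    intro p hp
    rw [PySem.Dict.items_counter] at hp
    obtain ⟨k, _, rfl⟩ := List.mem_map.mp hp
    exact Int.natCast_nonneg _
  have hfuel : pvMaxc (PySem.Dict.counter collection).items ≤ collection.length + 1 := by
    apply pvMaxc_le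
    intro p hp
    rw [PySem.Dict.items_counter] at hp
    obtain ⟨k, _, rfl⟩ := List.mem_map.mp hp
    have := List.count_le_length (l := collection) (a := k)
    simp only [Int.toNat_natCast]
    omega
  rw [pvLoopA_spec (collection.length + 1) (PySem.Dict.counter collection) []
        (PySem.Dict.nodup_keys_counter collection) hpos hfuel, List.nil_append]

-- ===== VERDICT (by name: the statement is the Claim_ definition above) =====
theorem organize_exhibition_spec : Claim_equal_organize_exhibition := by
  intro collection _
  unfold Spec_organize_exhibition organize_exhibition_alt
  rw [organize_exhibition_eq_pvSpec, pvFoldB_spec]
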